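-- pv_equiv track=rewrite | github.com/miliar/Code_Jam_Webscraper | solutions_python/Problem_148/33.py | solve
-- ===== SOURCE A (Python) =====
-- def solve(n,x,s):
--     s.sort()
--
--     discs = 0
--
--     while s!=[]:
--         discs += 1
--
--         # put biggest file on disc
--         remainingSize = x - s.pop()
--         # check if another file can be put on same disc
--         # choose it as big as possible
--         aFiles = [item for item in s if item<=remainingSize]
--         if aFiles!=[]:
--             s.remove(aFiles[-1])
--
--     return discs
-- ===== SOURCE B (Python) =====
-- def solve(n, x, s):
--     s.sort()
--     i, j = 0, len(s) - 1
--     discs = 0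
--     while i <= j:
--         if i < j and s[i] + s[j] <= x:
--             i += 1
--         j -= 1
--         discs += 1
--     return discs
-- ===== Notes on version B (the rewrite author's own statement) =====
-- stated objective: faster
-- what changed: A's per-disc rescan (pop the max, build the list of all files that still fit, remove the largest) is replaced by a single two-pointer sweep over the sorted list that pairs the largest remaining file with the smallest one when they fit; both greedies provably yield the same disc count.
import Mathlib
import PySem

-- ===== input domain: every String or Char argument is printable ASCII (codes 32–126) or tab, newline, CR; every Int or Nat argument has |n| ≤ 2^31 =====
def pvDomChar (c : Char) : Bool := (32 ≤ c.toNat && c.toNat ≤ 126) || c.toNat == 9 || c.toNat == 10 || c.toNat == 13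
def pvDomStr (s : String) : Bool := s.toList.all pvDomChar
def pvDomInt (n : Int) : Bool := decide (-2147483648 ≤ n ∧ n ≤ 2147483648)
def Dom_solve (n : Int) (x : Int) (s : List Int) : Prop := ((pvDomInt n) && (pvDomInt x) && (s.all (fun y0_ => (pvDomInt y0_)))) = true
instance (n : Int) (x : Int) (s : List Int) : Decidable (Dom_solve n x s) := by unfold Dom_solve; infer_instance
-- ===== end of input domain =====

-- B replaces A's quadratic "pop the max, scan for the biggest file that still fits,
-- remove it" loop by the sort-once two-pointer pairing (pair the max with the MIN if
-- it fits); the two greedies are proved to return the same disc count.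
-- Return-value equivalence only: A empties the caller's list via pop/remove,
-- B merely sorts it in place.

-- ===== PORT A =====
-- A's while-loop: s.pop() takes the last (= max) of the ascending list; aFiles is the
-- list comprehension; aFiles[-1] is its last element; s.remove erases the first occurrence.
def solveLoop (x : Int) (fuel : Nat) (s : List Int) : Int :=
  match fuel with
  | 0 => 0  -- never reached: fuel = len(s) bounds the loop's iteration count
  | fuel + 1 =>
    match s.getLast? with
    | none => 0
    | some m =>
      let b := s.dropLast
      let aFiles := b.filter (fun item => item ≤ x - m)
      match aFiles.getLast? with
      | none => 1 + solveLoop x fuel b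
      | some p => 1 + solveLoop x fuel (b.erase p)

def solve (n : Int) (x : Int) (s : List Int) : Int :=
  let t := PySem.List.sorted s (fun v => v) false
  solveLoop x t.length t

-- ===== PORT B =====
-- B's index two-pointer loop; whenever s[i], s[j] are read, 0 ≤ i < j < len holds,
-- so pyGetD's default is never used.
def solveAltLoop (x : Int) (a : List Int) (fuel : Nat) (i j : Int) : Int :=
  match fuel with
  | 0 => 0  -- never reached: fuel = len(s) bounds the loop's iteration count
  | fuel + 1 =>
    if i ≤ j then
      1 + (if i < j ∧ PySem.List.pyGetD a i 0 + PySem.List.pyGetD a j 0 ≤ x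
           then solveAltLoop x a fuel (i + 1) (j - 1)
           else solveAltLoop x a fuel i (j - 1))
    else 0

def solve_alt (n : Int) (x : Int) (s : List Int) : Int :=
  let t := PySem.List.sorted s (fun v => v) false
  solveAltLoop x t t.length 0 ((t.length : Int) - 1)

-- ===== PRECONDITION & SPEC =====
def Spec_solve (n : Int) (x : Int) (s : List Int) (out : Int) : Prop := out = solve_alt n x s
instance (n : Int) (x : Int) (s : List Int) (out : Int) : Decidable (Spec_solve n x s out) := by unfold Spec_solve; infer_instance

-- ===== CLAIM (what is proved, stated in full; the proofs are below) =====
def Claim_equal_solve : Prop := ∀ (n : Int) (x : Int) (s : List Int), Dom_solve n x s → Spec_solve n x s (solve n x s)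

-- ===== LEMMAS AND PROOFS =====

-- Reference two-pointer greedy on the sorted list itself (head = min, getLast = max).
def twoPtr (x : Int) (a : List Int) : Int :=
  match a with
  | [] => 0
  | lo :: rest =>
    match hr : rest.getLast? with
    | none => 1
    | some _hi =>
      if lo + _hi ≤ x then 1 + twoPtr x rest.dropLast
      else 1 + twoPtr x (lo :: rest.dropLast)
termination_by a.length
decreasing_by
  · have := @List.length_dropLast _ rest
    simp
  · have hne : rest ≠ [] := by intro h; subst h; simp at hr
    have := List.length_pos_iff.mpr hne
    have := @List.length_dropLast _ rest
    simp; omega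

lemma twoPtr_nil (x : Int) : twoPtr x [] = 0 := by simp [twoPtr]
lemma twoPtr_single (x lo : Int) : twoPtr x [lo] = 1 := by simp [twoPtr]
lemma twoPtr_cons_concat (x lo : Int) (b : List Int) (hi : Int) :
    twoPtr x (lo :: (b ++ [hi])) =
      if lo + hi ≤ x then 1 + twoPtr x b else 1 + twoPtr x (lo :: b) := by
  rw [twoPtr]
  have h : (b ++ [hi]).getLast? = some hi := by simp
  split
  · rename_i heq
    rw [h] at heq; cases heq
  · rename_i hi' heq
    rw [h] at heq
    cases heq
    simp

lemma twoPtr_allfit (x : Int) : ∀ (N : Nat) (a : List Int), a.length ≤ N →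
    (∀ u ∈ a, ∀ w ∈ a, u + w ≤ x) → twoPtr x a = (((a.length + 1) / 2 : Nat) : Int) := by
  intro N
  induction N with
  | zero =>
    intro a ha _
    have : a = [] := List.eq_nil_of_length_eq_zero (by omega)
    subst this; simp [twoPtr_nil]
  | succ N ih =>
    intro a ha hfit
    rcases a with _ | ⟨lo, rest⟩
    · simp [twoPtr_nil]
    rcases List.eq_nil_or_concat rest with rfl | ⟨b, hi, rfl⟩
    · simp [twoPtr_single]
    · rw [List.concat_eq_append] at *
      have hfithi : lo + hi ≤ x := hfit lo (by simp) hi (by simp)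
      rw [twoPtr_cons_concat, if_pos hfithi]
      have hb : twoPtr x b = (((b.length + 1) / 2 : Nat) : Int) :=
        ih b (by simp at ha; omega)
          (fun u hu w hw => hfit u (by simp [hu]) w (by simp [hw]))
      rw [hb]
      have hlen : ((lo :: (b ++ [hi])).length + 1) / 2 = (b.length + 1) / 2 + 1 := by
        simp; omega
      rw [hlen]
      push_cast; ring

lemma twoPtr_erase_eq_tail (x : Int) : ∀ (N : Nat) (a : List Int), a.length ≤ N →
    a.Pairwise (· ≤ ·) → ∀ v ∈ a, (∀ w ∈ a, v + w ≤ x) →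
    twoPtr x (a.erase v) = twoPtr x a.tail := by
  intro N
  induction N with
  | zero =>
    intro a ha _ v hv _
    have : a = [] := List.eq_nil_of_length_eq_zero (by omega)
    subst this; cases hv
  | succ N ih =>
    intro a ha hsort v hv hfit
    rcases a with _ | ⟨lo, t⟩
    · cases hv
    by_cases hvlo : v = lo
    · subst hvlo; simp [List.erase_cons_head]
    have herase : (lo :: t).erase v = lo :: t.erase v :=
      List.erase_cons_tail (by simp [Ne.symm hvlo])
    have hvt : v ∈ t := by
      rcases List.mem_cons.mp hv with h | h
      exacts [absurd h hvlo, h]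
    have hlo_le : ∀ w ∈ t, lo ≤ w := (List.pairwise_cons.mp hsort).1
    have hsort' : t.Pairwise (· ≤ ·) := (List.pairwise_cons.mp hsort).2
    rcases List.eq_nil_or_concat t with rfl | ⟨b, hi, rfl⟩
    · cases hvt
    rw [List.concat_eq_append] at *
    have hble : ∀ w ∈ b, w ≤ hi := by
      intro w hw
      exact (List.pairwise_append.mp hsort').2.2 w hw hi (by simp)
    have hvhi : v + hi ≤ x := hfit hi (by simp)
    have hlov : lo ≤ v := hlo_le v hvt
    rw [herase, List.tail_cons]
    by_cases hvb : v ∈ b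
    · -- v sits strictly inside: both sides pair the ends off, recurse on b
      rw [List.erase_append_left _ hvb, twoPtr_cons_concat,
          if_pos (by omega : lo + hi ≤ x)]
      rcases b with _ | ⟨lo2, b2⟩
      · cases hvb
      have hsb : (lo2 :: b2).Pairwise (· ≤ ·) :=
        hsort'.sublist (List.sublist_append_left _ _)
      have hlo2v : lo2 ≤ v := by
        rcases List.mem_cons.mp hvb with h | h
        · exact le_of_eq h.symm
        · exact (List.pairwise_cons.mp hsb).1 v h
      rw [List.cons_append, twoPtr_cons_concat, if_pos (by omega : lo2 + hi ≤ x)]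
      have hrec := ih (lo2 :: b2) (by simp at ha ⊢; omega) hsb v hvb
        (fun w hw => hfit w (by simp at hw ⊢; tauto))
      rw [List.tail_cons] at hrec
      rw [hrec]
    · -- v = hi is the maximum: every two members fit, count is ⌈len/2⌉ on both sides
      have hvhi' : v = hi := by
        rcases List.mem_append.mp hvt with h | h
        · exact absurd h hvb
        · simpa using h
      subst hvhi'
      rw [List.erase_append_right _ hvb]
      simp only [List.erase_cons_head, List.append_nil]
      have hle_v : ∀ u ∈ lo :: (b ++ [v]), u ≤ v := by
        intro u hu
        rcases List.mem_cons.mp hu with rfl | hu'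
        · exact hlov
        · rcases List.mem_append.mp hu' with h | h
          · exact hble u h
          · simp at h; omega
      have hfit1 : ∀ u ∈ lo :: b, ∀ w ∈ lo :: b, u + w ≤ x := by
        intro u hu w hw
        have h1 : u ≤ v := hle_v u (by simp at hu ⊢; tauto)
        have h2 : v + w ≤ x := hfit w (by simp at hw ⊢; tauto)
        omega
      have hfit2 : ∀ u ∈ b ++ [v], ∀ w ∈ b ++ [v], u + w ≤ x := by
        intro u hu w hw
        have h1 : u ≤ v := hle_v u (by simp at hu ⊢; tauto)
        have h2 : v + w ≤ x := hfit w (by simp at hw ⊢; tauto)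
        omega
      rw [twoPtr_allfit x (N + 1) (lo :: b) (by simp at ha ⊢; omega) hfit1,
          twoPtr_allfit x (N + 1) (b ++ [v]) (by simp at ha ⊢; omega) hfit2]
      simp


lemma solveLoop_nil (x : Int) (fuel : Nat) : solveLoop x fuel [] = 0 := by
  cases fuel <;> simp [solveLoop]

lemma solveLoop_concat (x m : Int) (fuel : Nat) (b : List Int) :
    solveLoop x (fuel + 1) (b ++ [m]) =
      match (b.filter (fun item => item ≤ x - m)).getLast? with
      | none => 1 + solveLoop x fuel b
      | some p => 1 + solveLoop x fuel (b.erase p) := by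
  simp only [solveLoop, List.getLast?_concat, List.dropLast_concat]

lemma solveLoop_eq_twoPtr (x : Int) : ∀ (N : Nat) (a : List Int), a.length ≤ N →
    a.Pairwise (· ≤ ·) → solveLoop x N a = twoPtr x a := by
  intro N
  induction N with
  | zero =>
    intro a ha _
    have : a = [] := List.eq_nil_of_length_eq_zero (by omega)
    subst this; simp [solveLoop_nil, twoPtr_nil]
  | succ N ih =>
    intro a ha hsort
    rcases List.eq_nil_or_concat a with rfl | ⟨b, m, rfl⟩
    · simp [solveLoop_nil, twoPtr_nil]

    rw [List.concat_eq_append] at *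
    have hbm : ∀ w ∈ b, w ≤ m := by
      intro w hw
      exact (List.pairwise_append.mp hsort).2.2 w hw m (by simp)
    have hsb : b.Pairwise (· ≤ ·) := (List.pairwise_append.mp hsort).1
    have hlb : b.length ≤ N := by simp at ha; omega
    rw [solveLoop_concat]
    cases hf : (b.filter (fun item => item ≤ x - m)).getLast? with
    | none =>
      have hfnil : ∀ w ∈ b, ¬ (w ≤ x - m) := by
        intro w hw hwle
        have h0 : b.filter (fun item => item ≤ x - m) = [] := List.getLast?_eq_none_iff.mp hf
        have h1 : w ∈ (b.filter (fun item => item ≤ x - m)) := by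
          rw [List.mem_filter]; exact ⟨hw, by simpa using hwle⟩
        rw [h0] at h1; cases h1
      show 1 + solveLoop x N b = twoPtr x (b ++ [m])
      rw [ih b hlb hsb]
      rcases b with _ | ⟨lo, b2⟩
      · simp [twoPtr_nil, twoPtr_single]
      rw [List.cons_append, twoPtr_cons_concat,
          if_neg (by have := hfnil lo (by simp); omega)]
    | some p =>
      have hpf : p ∈ b.filter (fun item => item ≤ x - m) := by
        exact List.mem_of_getLast? hf
      have hpb : p ∈ b := (List.mem_filter.mp hpf).1
      have hpx : p ≤ x - m := by have := (List.mem_filter.mp hpf).2; simpa using this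
      have hse : (b.erase p).Pairwise (· ≤ ·) := hsb.sublist (List.erase_sublist ..)
      have hle : (b.erase p).length ≤ N := le_trans List.length_erase_le hlb
      show 1 + solveLoop x N (b.erase p) = twoPtr x (b ++ [m])
      rw [ih (b.erase p) hle hse]
      rcases b with _ | ⟨lo, b2⟩
      · cases hpb
      have hlop : lo ≤ p := by
        rcases List.mem_cons.mp hpb with h | h
        · exact le_of_eq h.symm
        · exact (List.pairwise_cons.mp hsb).1 p h
      rw [List.cons_append, twoPtr_cons_concat, if_pos (by omega : lo + m ≤ x)]
      have hexch := twoPtr_erase_eq_tail x (N) (lo :: b2) (by simpa using hlb) hsb p hpb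
        (fun w hw => by have h1 := hbm w hw; omega)
      rw [List.tail_cons] at hexch
      rw [hexch]

lemma altLoop_stop (x : Int) (a : List Int) (fuel : Nat) (i j : Int) (h : ¬ i ≤ j) :
    solveAltLoop x a fuel i j = 0 := by
  cases fuel <;> simp [solveAltLoop, h]

lemma altLoop_step (x : Int) (a : List Int) (fuel : Nat) (i j : Int) (h : i ≤ j) :
    solveAltLoop x a (fuel + 1) i j =
      1 + (if i < j ∧ PySem.List.pyGetD a i 0 + PySem.List.pyGetD a j 0 ≤ x
           then solveAltLoop x a fuel (i + 1) (j - 1)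
           else solveAltLoop x a fuel i (j - 1)) := by
  simp [solveAltLoop, h]

lemma altLoop_eq_twoPtr (x : Int) (a : List Int) : ∀ (N di dj : Nat), dj + 1 - di ≤ N →
    dj < a.length →
    solveAltLoop x a N (di : Int) (dj : Int) = twoPtr x ((a.drop di).take (dj + 1 - di)) := by
  intro N
  induction N with
  | zero =>
    intro di dj hN hlen
    have hij : ¬ di ≤ dj := by omega
    rw [altLoop_stop x a 0 _ _ (by push_cast; omega),
        show dj + 1 - di = 0 by omega, List.take_zero, twoPtr_nil]
  | succ N ih =>
    intro di dj hN hlen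
    by_cases hij : di ≤ dj
    · have hdi : di < a.length := by omega
      have hga : PySem.List.pyGetD a (di : Int) 0 = a[di] := by
        rw [PySem.List.pyGetD_natCast]; exact List.getD_eq_getElem _ _ hdi
      have hgb : PySem.List.pyGetD a (dj : Int) 0 = a[dj] := by
        rw [PySem.List.pyGetD_natCast]; exact List.getD_eq_getElem _ _ hlen
      rw [altLoop_step x a N _ _ (by exact_mod_cast hij)]
      rcases eq_or_lt_of_le hij with hdd | hlt
      · -- di = dj : single element left
        subst hdd
        rw [if_neg (by push_cast; omega)]
        rw [altLoop_stop x a N _ _ (by push_cast; omega)]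
        rw [show di + 1 - di = 1 by omega, List.drop_eq_getElem_cons hdi,
            List.take_succ_cons, List.take_zero, twoPtr_single]
        norm_num
      · -- di < dj
        have hseg1 : (a.drop di).take (dj + 1 - di)
            = a[di] :: ((a.drop (di + 1)).take (dj - di)) := by
          rw [List.drop_eq_getElem_cons hdi, show dj + 1 - di = (dj - di) + 1 by omega,
              List.take_succ_cons]
        have hget : (a.drop (di + 1))[dj - di - 1]? = some a[dj] := by
          rw [List.getElem?_drop, show di + 1 + (dj - di - 1) = dj by omega,
              List.getElem?_eq_getElem hlen]
        have hseg2 : (a.drop (di + 1)).take (dj - di)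
            = ((a.drop (di + 1)).take (dj - di - 1)) ++ [a[dj]] := by
          rw [show dj - di = (dj - di - 1) + 1 by omega, List.take_succ, hget]
          simp
        by_cases hsum : a[di] + a[dj] ≤ x
        · rw [if_pos ⟨by exact_mod_cast hlt, by rw [hga, hgb]; exact hsum⟩]
          have hc1 : (di : Int) + 1 = ((di + 1 : Nat) : Int) := by push_cast; ring
          have hc2 : (dj : Int) - 1 = ((dj - 1 : Nat) : Int) := by push_cast [Nat.cast_sub (by omega : 1 ≤ dj)]; ring
          rw [hc1, hc2, ih (di + 1) (dj - 1) (by omega) (by omega)]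
          rw [hseg1, hseg2, twoPtr_cons_concat, if_pos hsum,
              show dj - 1 + 1 - (di + 1) = dj - di - 1 by omega]
        · rw [if_neg (by rw [hga, hgb]; intro hc; exact hsum hc.2)]
          have hc2 : (dj : Int) - 1 = ((dj - 1 : Nat) : Int) := by push_cast [Nat.cast_sub (by omega : 1 ≤ dj)]; ring
          rw [hc2, ih di (dj - 1) (by omega) (by omega)]
          rw [hseg1, hseg2, twoPtr_cons_concat, if_neg hsum,
              show dj - 1 + 1 - di = (dj - di - 1) + 1 by omega,
              List.drop_eq_getElem_cons hdi, List.take_succ_cons]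
    · rw [altLoop_stop x a (N + 1) _ _ (by push_cast; omega),
          show dj + 1 - di = 0 by omega, List.take_zero, twoPtr_nil]

-- Both loops compute twoPtr of the sorted list.
lemma loops_agree (x : Int) (t : List Int) (hsort : t.Pairwise (· ≤ ·)) :
    solveLoop x t.length t = solveAltLoop x t t.length 0 ((t.length : Int) - 1) := by
  rw [solveLoop_eq_twoPtr x t.length t le_rfl hsort]
  rcases t with _ | ⟨h0, t0⟩
  · rw [twoPtr_nil, altLoop_stop x [] _ _ _ (by norm_num)]
  · have h1 : (((h0 :: t0).length : Int)) - 1 = (((h0 :: t0).length - 1 : Nat) : Int) := by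
      simp
    rw [h1, show (0 : Int) = ((0 : Nat) : Int) from rfl,
        altLoop_eq_twoPtr x _ ((h0 :: t0).length) 0 ((h0 :: t0).length - 1) (by simp) (by simp)]
    rw [List.drop_zero, show (h0 :: t0).length - 1 + 1 - 0 = (h0 :: t0).length by simp,
        List.take_length]

-- ===== VERDICT (by name: the statement is the Claim_ definition above) =====
theorem solve_spec : Claim_equal_solve := by
  intro n x s _
  unfold Spec_solve solve solve_alt
  exact loops_agree x _ (PySem.List.sorted_pairwise s (fun v => v))
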